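-- pv_equiv track=rewrite | github.com/ramsaroban/AttendanceProbability | attendance_brute_force.py | attendance_brute_force
-- ===== SOURCE A (Python) =====
-- def generate_sequences(n, seq, results):
--     if len(seq) == n:
--         results.append(seq)
--         return
--     generate_sequences(n, seq + 'P', results)
--     generate_sequences(n, seq + 'A', results)
--
-- def attendance_brute_force(N):
--     all_sequences = []
--     generate_sequences(N, '', all_sequences)
--
--     valid_sequences = []
--     for seq in all_sequences:
--         if 'AAAA' not in seq:
--             valid_sequences.append(seq)
--
--     total_valid_sequences = len(valid_sequences)
--     sequences_missing_graduation = []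
--     for seq in valid_sequences:
--         if seq.endswith('A') or seq.endswith('AA') or seq.endswith('AAA'):
--             sequences_missing_graduation.append(seq)
--
--     count_missing_graduation = len(sequences_missing_graduation)
--
--     return f"{count_missing_graduation}/{total_valid_sequences}"
-- ===== SOURCE B (Python) =====
-- def attendance_brute_force(N):
--     # Linear DP: c[j] = number of 'AAAA'-free strings of the current length
--     # whose trailing run of 'A's has length j (j = 0..3).
--     c0, c1, c2, c3 = 1, 0, 0, 0
--     for _ in range(N):
--         c0, c1, c2, c3 = c0 + c1 + c2 + c3, c0, c1, c2
--     return f"{c1 + c2 + c3}/{c0 + c1 + c2 + c3}"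
-- ===== Notes on version B (the rewrite author's own statement) =====
-- stated objective: faster
-- what changed: Replaces the enumeration of all 2^N strings followed by two filtering passes with a linear dynamic program over the length of the trailing run of 'A's (states 0-3), so no sequence list is ever materialised.
import Mathlib
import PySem

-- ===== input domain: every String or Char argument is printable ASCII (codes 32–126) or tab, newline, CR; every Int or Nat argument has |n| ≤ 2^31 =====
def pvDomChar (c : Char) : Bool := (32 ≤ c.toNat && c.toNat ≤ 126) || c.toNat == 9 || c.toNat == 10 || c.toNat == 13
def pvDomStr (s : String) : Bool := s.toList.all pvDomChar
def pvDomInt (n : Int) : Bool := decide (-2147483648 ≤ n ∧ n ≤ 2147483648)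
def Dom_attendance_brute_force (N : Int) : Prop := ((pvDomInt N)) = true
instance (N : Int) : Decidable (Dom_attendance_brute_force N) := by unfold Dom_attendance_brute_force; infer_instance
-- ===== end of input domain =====

-- B replaces A's enumeration of all 2^N strings followed by two filtering passes with a
-- dynamic program on the length of the trailing run of 'A's (states 0..3).
-- Strings are handled on the List Char side (PySem.Chars); results rebuilt with String.ofList.

-- ===== PORT A =====
-- generate_sequences(n, seq, results): the results accumulation is returned as the produced list.
-- The branch 'n ≤ len(seq) (and ≠)' returns [] only to make the recursion total; Python A never
-- reaches it for 0 ≤ n and recurses forever for n < 0 (excluded by Pre_).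
def pvGenA (n : Int) (seq : List Char) : List (List Char) :=
  if (seq.length : Int) = n then [seq]
  else if n ≤ (seq.length : Int) then []
  else pvGenA n (seq ++ ['P']) ++ pvGenA n (seq ++ ['A'])
termination_by (n - seq.length).toNat
decreasing_by
  all_goals simp only [List.length_append, List.length_cons, List.length_nil]
  all_goals omega

def attendance_brute_force (N : Int) : String :=
  let all_sequences := pvGenA N []
  let valid_sequences :=
    all_sequences.foldl
      (fun acc seq => if !(PySem.Chars.isIn ['A','A','A','A'] seq) then acc ++ [seq] else acc) []
  let total_valid_sequences : Int := valid_sequences.length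
  let sequences_missing_graduation :=
    valid_sequences.foldl
      (fun acc seq =>
        if PySem.Chars.endswith seq ['A'] || PySem.Chars.endswith seq ['A','A'] ||
            PySem.Chars.endswith seq ['A','A','A'] then acc ++ [seq] else acc) []
  let count_missing_graduation : Int := sequences_missing_graduation.length
  String.ofList (PySem.Int.toChars count_missing_graduation ++ '/' :: PySem.Int.toChars total_valid_sequences)

-- ===== PORT B =====
def pvStepB : Int × Int × Int × Int → Int × Int × Int × Int
  | (c0, c1, c2, c3) => (c0 + c1 + c2 + c3, c0, c1, c2)

def attendance_brute_force_alt (N : Int) : String :=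
  let c := (PySem.List.pyRange 0 N 1).foldl (fun c _ => pvStepB c) (1, 0, 0, 0)
  String.ofList (PySem.Int.toChars (c.2.1 + c.2.2.1 + c.2.2.2) ++
    '/' :: PySem.Int.toChars (c.1 + c.2.1 + c.2.2.1 + c.2.2.2))

-- ===== PRECONDITION & SPEC =====
-- Pre_ excludes exactly N < 0, where Python A's recursion never reaches len(seq) == N and
-- dies with RecursionError.
def Pre_attendance_brute_force (N : Int) : Prop := 0 ≤ N
instance (N : Int) : Decidable (Pre_attendance_brute_force N) := by
  unfold Pre_attendance_brute_force; infer_instance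
def pvWitness_attendance_brute_force : Int := (3)

def Spec_attendance_brute_force (N : Int) (out : String) : Prop := out = attendance_brute_force_alt N
instance (N : Int) (out : String) : Decidable (Spec_attendance_brute_force N out) := by unfold Spec_attendance_brute_force; infer_instance

-- ===== CLAIM (what is proved, stated in full; the proofs are below) =====
def Claim_equal_attendance_brute_force : Prop := ∀ (N : Int), Dom_attendance_brute_force N → Pre_attendance_brute_force N → Spec_attendance_brute_force N (attendance_brute_force N)

-- ===== LEMMAS AND PROOFS =====

-- all P/A strings of length k in Port A's (prepend) order, and in append order
def pvExt : Nat → List (List Char)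
  | 0 => [[]]
  | k + 1 => (pvExt k).map ('P' :: ·) ++ (pvExt k).map ('A' :: ·)

def pvL : Nat → List (List Char)
  | 0 => [[]]
  | k + 1 => (pvL k).flatMap (fun s => [s ++ ['P'], s ++ ['A']])

-- length of the trailing run of 'A's, and 'AAAA'-freeness
def pvRun (s : List Char) : Nat := (s.reverse.takeWhile (· == 'A')).length
def pvOk (s : List Char) : Bool := !(PySem.Chars.isIn ['A','A','A','A'] s)

theorem pvGenA_eq (k : Nat) : ∀ (n : Int) (seq : List Char), 0 ≤ n →
    n - seq.length = k → pvGenA n seq = (pvExt k).map (seq ++ ·) := by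
  induction k with
  | zero =>
    intro n seq _ h
    rw [pvGenA]
    have : (seq.length : Int) = n := by omega
    simp [this, pvExt]
  | succ k ih =>
    intro n seq hn h
    rw [pvGenA]
    have h1 : ¬ (seq.length : Int) = n := by omega
    have h2 : ¬ n ≤ (seq.length : Int) := by omega
    rw [if_neg h1, if_neg h2]
    rw [ih n (seq ++ ['P']) hn (by simp; omega), ih n (seq ++ ['A']) hn (by simp; omega)]
    simp only [pvExt, List.map_append, List.map_map]
    congr 1 <;> (apply List.map_congr_left; intro r _; simp)

theorem mem_pvExt (k : Nat) (x : List Char) :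
    x ∈ pvExt k ↔ x.length = k ∧ ∀ c ∈ x, c = 'P' ∨ c = 'A' := by
  induction k generalizing x with
  | zero =>
    simp only [pvExt, List.mem_singleton]
    constructor
    · rintro rfl; simp
    · rintro ⟨hl, _⟩; exact List.length_eq_zero_iff.1 hl
  | succ k ih =>
    simp only [pvExt, List.mem_append, List.mem_map]
    constructor
    · rintro (⟨y, hy, rfl⟩ | ⟨y, hy, rfl⟩) <;>
        (obtain ⟨hl, hc⟩ := (ih y).1 hy
         refine ⟨by simp [hl], ?_⟩
         intro c hc'
         rcases List.mem_cons.1 hc' with rfl | h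
         · simp
         · exact hc c h)
    · rintro ⟨hl, hc⟩
      cases x with
      | nil => simp at hl
      | cons c y =>
        have hy : y ∈ pvExt k := (ih y).2 ⟨by simpa using hl, fun d hd => hc d (List.mem_cons_of_mem _ hd)⟩
        rcases hc c List.mem_cons_self with rfl | rfl
        · exact Or.inl ⟨y, hy, rfl⟩
        · exact Or.inr ⟨y, hy, rfl⟩

theorem mem_pvL (k : Nat) (x : List Char) :
    x ∈ pvL k ↔ x.length = k ∧ ∀ c ∈ x, c = 'P' ∨ c = 'A' := by
  induction k generalizing x with
  | zero =>
    simp only [pvL, List.mem_singleton]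
    constructor
    · rintro rfl; simp
    · rintro ⟨hl, _⟩; exact List.length_eq_zero_iff.1 hl
  | succ k ih =>
    simp only [pvL, List.mem_flatMap, List.mem_cons]
    constructor
    · rintro ⟨y, hy, rfl | (rfl | h)⟩
      · obtain ⟨hl, hc⟩ := (ih y).1 hy
        exact ⟨by simp [hl], fun c hc' => by
          rcases List.mem_append.1 hc' with h | h
          · exact hc c h
          · simp at h; subst h; exact Or.inl rfl⟩
      · obtain ⟨hl, hc⟩ := (ih y).1 hy
        exact ⟨by simp [hl], fun c hc' => by
          rcases List.mem_append.1 hc' with h | h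
          · exact hc c h
          · simp at h; subst h; exact Or.inr rfl⟩
      · simp at h
    · rintro ⟨hl, hc⟩
      have hx : x ≠ [] := by intro h; subst h; simp at hl
      obtain ⟨y, c, rfl⟩ : ∃ y c, x = y ++ [c] :=
        ⟨x.dropLast, x.getLast hx, (List.dropLast_append_getLast hx).symm⟩
      have hy : y ∈ pvL k := (ih y).2
        ⟨by simp only [List.length_append, List.length_singleton] at hl; omega,
         fun d hd => hc d (by simp [hd])⟩
      rcases hc c (by simp) with rfl | rfl
      · exact ⟨y, hy, Or.inl rfl⟩
      · exact ⟨y, hy, Or.inr (Or.inl rfl)⟩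

theorem nodup_pvExt (k : Nat) : (pvExt k).Nodup := by
  induction k with
  | zero => simp [pvExt]
  | succ k ih =>
    rw [pvExt, List.nodup_append]
    refine ⟨ih.map (fun a b h => by simpa using h), ih.map (fun a b h => by simpa using h), ?_⟩
    intro x hx y hy
    simp only [List.mem_map] at hx hy
    obtain ⟨a, ha, rfl⟩ := hx
    obtain ⟨b, hb, rfl⟩ := hy
    simp

theorem pvConcat_inj (s t : List Char) (c d : Char) (h : s ++ [c] = t ++ [d]) : s = t ∧ c = d := by
  obtain ⟨h1, h2⟩ := List.append_inj' h rfl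
  exact ⟨h1, by simpa using h2⟩

theorem nodup_flatMapPA (l : List (List Char)) (hl : l.Nodup) :
    (l.flatMap fun s => [s ++ ['P'], s ++ ['A']]).Nodup := by
  induction l with
  | nil => simp
  | cons s t ih =>
    rw [List.flatMap_cons, List.nodup_append]
    refine ⟨by simp, ih (List.nodup_cons.1 hl).2, ?_⟩
    intro x hx y hy
    simp only [List.mem_flatMap, List.mem_cons, List.not_mem_nil, or_false] at hx hy
    obtain ⟨u, hu, hy'⟩ := hy
    have hsu : s ≠ u := fun h => (List.nodup_cons.1 hl).1 (h ▸ hu)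
    rintro rfl
    rcases hx with rfl | rfl <;> rcases hy' with h | h <;>
      exact hsu (pvConcat_inj _ _ _ _ h.symm).1.symm

theorem nodup_pvL (k : Nat) : (pvL k).Nodup := by
  induction k with
  | zero => simp [pvL]
  | succ k ih => exact nodup_flatMapPA _ ih

theorem perm_pvExt_pvL (k : Nat) : (pvExt k).Perm (pvL k) :=
  (List.perm_ext_iff_of_nodup (nodup_pvExt k) (nodup_pvL k)).2
    (fun x => (mem_pvExt k x).trans (mem_pvL k x).symm)

theorem pvReplicate_prefix_iff (k : Nat) (l : List Char) :
    List.replicate k 'A' <+: l ↔ k ≤ (l.takeWhile (· == 'A')).length := by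
  induction k generalizing l with
  | zero => simp
  | succ k ih =>
    cases l with
    | nil => simp [List.replicate_succ]
    | cons c l' =>
      rw [List.replicate_succ, List.cons_prefix_cons]
      by_cases hc : c = 'A'
      · subst hc; simp [ih]
      · simp [hc, Ne.symm hc]

theorem pvRun_append_P (s : List Char) : pvRun (s ++ ['P']) = 0 := by
  simp [pvRun]

theorem pvRun_append_A (s : List Char) : pvRun (s ++ ['A']) = pvRun s + 1 := by
  simp [pvRun]

theorem pvSuffix_iff_run (k : Nat) (s : List Char) :
    List.replicate k 'A' <:+ s ↔ k ≤ pvRun s := by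
  rw [pvRun, ← pvReplicate_prefix_iff]
  constructor
  · intro h; have := h.reverse; simpa using this
  · intro h; have := h.reverse; simpa using this

theorem pvSnoc_suffix_snoc (t s : List Char) (c d : Char) :
    t ++ [c] <:+ s ++ [d] ↔ c = d ∧ t <:+ s := by
  constructor
  · rintro ⟨w, hw⟩
    rw [← List.append_assoc] at hw
    obtain ⟨h1, h2⟩ := pvConcat_inj _ _ _ _ hw
    exact ⟨h2, ⟨w, h1⟩⟩
  · rintro ⟨rfl, w, hw⟩
    exact ⟨w, by rw [← List.append_assoc, hw]⟩

theorem pvInfix_snoc (t : List Char) (s : List Char) (c : Char) :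
    t <:+: s ++ [c] ↔ t <:+: s ∨ t <:+ s ++ [c] := by
  constructor
  · intro h
    rw [← List.reverse_infix, List.reverse_append] at h
    simp only [List.reverse_singleton, List.singleton_append] at h
    rcases List.infix_cons_iff.1 h with h | h
    · right; have := h.reverse; simpa using this
    · left; rwa [List.reverse_infix] at h
  · rintro (h | h)
    · exact h.trans (List.prefix_append s [c]).isInfix
    · exact h.isInfix

theorem pvOk_append_P (s : List Char) : pvOk (s ++ ['P']) = pvOk s := by
  rw [Bool.eq_iff_iff]
  simp only [pvOk, Bool.not_eq_eq_eq_not, Bool.not_true, PySem.Chars.isIn_eq_false_iff]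
  rw [pvInfix_snoc]
  constructor
  · intro h h2; exact h (Or.inl h2)
  · intro h
    rintro (h2 | h2)
    · exact h h2
    · have h2' : ['A','A','A'] ++ ['A'] <:+ s ++ ['P'] := h2
      have h3 := (pvSnoc_suffix_snoc _ _ _ _).1 h2'
      simp at h3

theorem pvOk_append_A (s : List Char) :
    pvOk (s ++ ['A']) = (pvOk s && decide (pvRun s < 3)) := by
  rw [Bool.eq_iff_iff]
  simp only [pvOk, Bool.and_eq_true, Bool.not_eq_eq_eq_not, Bool.not_true,
    PySem.Chars.isIn_eq_false_iff, decide_eq_true_eq]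
  rw [pvInfix_snoc]
  have hsfx : (['A','A','A','A'] <:+ s ++ ['A']) ↔ 3 ≤ pvRun s := by
    rw [show (['A','A','A','A'] : List Char) = ['A','A','A'] ++ ['A'] from rfl, pvSnoc_suffix_snoc]
    rw [show (['A','A','A'] : List Char) = List.replicate 3 'A' from rfl, pvSuffix_iff_run]
    simp
  constructor
  · intro h
    refine ⟨fun h2 => h (Or.inl h2), ?_⟩
    by_contra h3
    exact h (Or.inr (hsfx.2 (by omega)))
  · rintro ⟨h1, h2⟩ (h3 | h3)
    · exact h1 h3
    · have := hsfx.1 h3; omega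

theorem pvOk_run_le (s : List Char) (h : pvOk s = true) : pvRun s ≤ 3 := by
  by_contra hlt
  have h4 : List.replicate 4 'A' <:+ s := (pvSuffix_iff_run 4 s).2 (by omega)
  simp only [pvOk, Bool.not_eq_eq_eq_not, Bool.not_true, PySem.Chars.isIn_eq_false_iff] at h
  exact h (by simpa using h4.isInfix)

theorem pvEnds_eq (s : List Char) :
    (PySem.Chars.endswith s ['A'] || PySem.Chars.endswith s ['A','A'] ||
      PySem.Chars.endswith s ['A','A','A']) = decide (1 ≤ pvRun s) := by
  rw [Bool.eq_iff_iff]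
  simp only [Bool.or_eq_true, PySem.Chars.endswith_iff, decide_eq_true_eq]
  rw [show (['A','A','A'] : List Char) = List.replicate 3 'A' from rfl,
    show (['A','A'] : List Char) = List.replicate 2 'A' from rfl,
    show (['A'] : List Char) = List.replicate 1 'A' from rfl,
    pvSuffix_iff_run, pvSuffix_iff_run, pvSuffix_iff_run]
  omega

theorem pvCountP_flatMap_pair (l : List (List Char)) (g h : List Char → List Char)
    (p : List Char → Bool) :
    (l.flatMap fun s => [g s, h s]).countP p
      = l.countP (fun s => p (g s)) + l.countP (fun s => p (h s)) := by
  induction l with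
  | nil => simp
  | cons x t ih =>
    simp only [List.flatMap_cons, List.countP_append, List.countP_cons, ih]
    cases hp : p (g x) <;> cases hq : p (h x) <;> simp [hp, hq] <;> omega

theorem pvCountP_split {α : Type} (l : List α) (p q : α → Bool) :
    l.countP p = l.countP (fun x => p x && q x) + l.countP (fun x => p x && !q x) := by
  induction l with
  | nil => simp
  | cons x t ih =>
    cases hp : p x <;> cases hq : q x <;> simp [List.countP_cons, hp, hq, ih] <;> omega

def pvCnt (k j : Nat) : Nat := (pvL k).countP (fun s => pvOk s && pvRun s == j)

theorem pvCountP_ok (k : Nat) :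
    (pvL k).countP pvOk = pvCnt k 0 + pvCnt k 1 + pvCnt k 2 + pvCnt k 3 := by
  rw [pvCountP_split (pvL k) pvOk (fun s => pvRun s == 0)]
  rw [pvCountP_split (pvL k) (fun x => pvOk x && !(pvRun x == 0)) (fun s => pvRun s == 1)]
  rw [pvCountP_split (pvL k) (fun x => (pvOk x && !(pvRun x == 0)) && !(pvRun x == 1)) (fun s => pvRun s == 2)]
  have e1 : (pvL k).countP (fun x => (pvOk x && !(pvRun x == 0)) && pvRun x == 1)
      = pvCnt k 1 := by
    apply List.countP_congr; intro a _
    cases h : pvOk a <;> by_cases hr : pvRun a = 1 <;> simp [pvCnt, h, hr]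
  have e2 : (pvL k).countP (fun x => ((pvOk x && !(pvRun x == 0)) && !(pvRun x == 1)) && pvRun x == 2)
      = pvCnt k 2 := by
    apply List.countP_congr; intro a _
    cases h : pvOk a <;> by_cases hr : pvRun a = 2 <;> simp [pvCnt, h, hr] <;> omega
  have e3 : (pvL k).countP (fun x => ((pvOk x && !(pvRun x == 0)) && !(pvRun x == 1)) && !(pvRun x == 2))
      = pvCnt k 3 := by
    apply List.countP_congr; intro a _
    cases h : pvOk a
    · simp [pvCnt, h]
    · have := pvOk_run_le a h
      by_cases hr : pvRun a = 3 <;> simp [pvCnt, h, hr] <;> omega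
  rw [e1, e2, e3]
  simp [pvCnt]
  omega

theorem pvCnt_succ_zero (k : Nat) :
    pvCnt (k+1) 0 = pvCnt k 0 + pvCnt k 1 + pvCnt k 2 + pvCnt k 3 := by
  rw [← pvCountP_ok]
  show (pvL (k+1)).countP _ = _
  rw [pvL, pvCountP_flatMap_pair]
  have e1 : (pvL k).countP (fun s => pvOk (s ++ ['P']) && pvRun (s ++ ['P']) == 0)
      = (pvL k).countP pvOk := by
    apply List.countP_congr; intro a _; simp [pvOk_append_P, pvRun_append_P]
  have e2 : (pvL k).countP (fun s => pvOk (s ++ ['A']) && pvRun (s ++ ['A']) == 0) = 0 := by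
    rw [List.countP_eq_zero]; intro a _; simp [pvRun_append_A]
  rw [e1, e2]
  omega

theorem pvCnt_succ_succ (k j : Nat) (hj : j ≤ 2) :
    pvCnt (k+1) (j+1) = pvCnt k j := by
  show (pvL (k+1)).countP _ = _
  rw [pvL, pvCountP_flatMap_pair]
  have e1 : (pvL k).countP (fun s => pvOk (s ++ ['P']) && pvRun (s ++ ['P']) == (j+1)) = 0 := by
    rw [List.countP_eq_zero]; intro a _; simp [pvRun_append_P]
  have e2 : (pvL k).countP (fun s => pvOk (s ++ ['A']) && pvRun (s ++ ['A']) == (j+1))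
      = pvCnt k j := by
    apply List.countP_congr; intro a _
    rw [pvOk_append_A, pvRun_append_A]
    cases h : pvOk a <;> by_cases hr : pvRun a = j <;> simp [pvCnt, h, hr] <;> omega
  rw [e1, e2]
  omega

theorem pvCountP_miss (k : Nat) :
    (pvL k).countP (fun s =>
        (PySem.Chars.endswith s ['A'] || PySem.Chars.endswith s ['A','A'] ||
          PySem.Chars.endswith s ['A','A','A']) && pvOk s)
      = pvCnt k 1 + pvCnt k 2 + pvCnt k 3 := by
  have e0 : (pvL k).countP (fun s =>
        (PySem.Chars.endswith s ['A'] || PySem.Chars.endswith s ['A','A'] ||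
          PySem.Chars.endswith s ['A','A','A']) && pvOk s)
      = (pvL k).countP (fun s => pvOk s && decide (1 ≤ pvRun s)) := by
    apply List.countP_congr; intro a _
    rw [pvEnds_eq, Bool.and_comm]
  rw [e0]
  rw [pvCountP_split (pvL k) (fun s => pvOk s && decide (1 ≤ pvRun s)) (fun s => pvRun s == 1)]
  rw [pvCountP_split (pvL k) (fun x => (pvOk x && decide (1 ≤ pvRun x)) && !(pvRun x == 1)) (fun s => pvRun s == 2)]
  have e1 : (pvL k).countP (fun x => (pvOk x && decide (1 ≤ pvRun x)) && pvRun x == 1)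
      = pvCnt k 1 := by
    apply List.countP_congr; intro a _
    cases h : pvOk a <;> by_cases hr : pvRun a = 1 <;> simp [pvCnt, h, hr]
  have e2 : (pvL k).countP (fun x => ((pvOk x && decide (1 ≤ pvRun x)) && !(pvRun x == 1)) && pvRun x == 2)
      = pvCnt k 2 := by
    apply List.countP_congr; intro a _
    cases h : pvOk a <;> by_cases hr : pvRun a = 2 <;> simp [pvCnt, h, hr] <;> omega
  have e3 : (pvL k).countP (fun x => ((pvOk x && decide (1 ≤ pvRun x)) && !(pvRun x == 1)) && !(pvRun x == 2))
      = pvCnt k 3 := by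
    apply List.countP_congr; intro a _
    cases h : pvOk a
    · simp [pvCnt, h]
    · have := pvOk_run_le a h
      by_cases hr : pvRun a = 3 <;> simp [pvCnt, h, hr] <;> omega
  rw [e1, e2, e3]
  omega

theorem pvFold (m : Nat) :
    (List.range m).foldl (fun c _ => pvStepB c) ((1:Int), (0:Int), (0:Int), (0:Int))
      = ((pvCnt m 0 : Int), (pvCnt m 1 : Int), (pvCnt m 2 : Int), (pvCnt m 3 : Int)) := by
  induction m with
  | zero => simp [pvCnt, pvL, pvOk, pvRun]; decide
  | succ m ih =>
    rw [List.range_succ, List.foldl_append, ih]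
    simp only [List.foldl_cons, List.foldl_nil, pvStepB]
    rw [pvCnt_succ_zero, pvCnt_succ_succ m 0 (by omega), pvCnt_succ_succ m 1 (by omega),
      pvCnt_succ_succ m 2 (by omega)]
    push_cast
    ring_nf

-- ===== VERDICT (by name: the statement is the Claim_ definition above) =====
theorem attendance_brute_force_spec : Claim_equal_attendance_brute_force := by
  intro N _ hPre
  unfold Pre_attendance_brute_force at hPre
  unfold Spec_attendance_brute_force
  simp only [attendance_brute_force, attendance_brute_force_alt]
  have hN : N = (N.toNat : Int) := (Int.toNat_of_nonneg hPre).symm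
  set n := N.toNat with hn
  -- A side: the generated list is pvExt n, the two loops are filters
  have hgen : pvGenA N [] = pvExt n := by
    rw [pvGenA_eq n N [] hPre (by simp [← hN])]
    simp
  rw [hgen]
  have hf1 : ∀ (l : List (List Char)) (p : List Char → Bool),
      l.foldl (fun acc x => if p x then acc ++ [x] else acc) [] = l.filter p := by
    intro l p
    have := PySem.List.foldl_append_if (p := p) (f := id) (l := l) (acc := [])
    simpa using this
  rw [hf1, hf1]
  rw [show (fun seq => !PySem.Chars.isIn ['A','A','A','A'] seq) = pvOk from rfl]
  -- B side: the fold over range(N) is the DP quadruple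
  have hb : (PySem.List.pyRange 0 N 1).foldl (fun c _ => pvStepB c) (1, 0, 0, 0)
      = ((pvCnt n 0 : Int), (pvCnt n 1 : Int), (pvCnt n 2 : Int), (pvCnt n 3 : Int)) := by
    rw [PySem.List.pyRange_one, List.foldl_map]
    have : (N - 0).toNat = n := by omega
    rw [this, pvFold]
  rw [hb]
  -- reduce both sides to the counts
  have hperm := perm_pvExt_pvL n
  have htot : ((pvExt n).filter pvOk).length
      = pvCnt n 0 + pvCnt n 1 + pvCnt n 2 + pvCnt n 3 := by
    rw [← List.countP_eq_length_filter, hperm.countP_eq, pvCountP_ok]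
  have hmiss : (((pvExt n).filter pvOk).filter (fun s =>
        PySem.Chars.endswith s ['A'] || PySem.Chars.endswith s ['A','A'] ||
          PySem.Chars.endswith s ['A','A','A'])).length
      = pvCnt n 1 + pvCnt n 2 + pvCnt n 3 := by
    rw [← List.countP_eq_length_filter, List.countP_filter, hperm.countP_eq, pvCountP_miss]
  rw [hmiss, htot]
  push_cast
  ring_nf
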